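-- pv_equiv track=rewrite | github.com/Grami-code/MPI | Sat.py | find_pure_literals
-- ===== SOURCE A (Python) =====
-- def find_pure_literals(formula):
--     counter = {}
--     for clause in formula:
--         for literal in clause:
--             counter[literal] = counter.get(literal, 0) + 1
--     pure_literals = set()
--     for literal in counter:
--         if -literal not in counter:
--             pure_literals.add(literal)
--     return pure_literals
-- ===== SOURCE B (Python) =====
-- def find_pure_literals(formula):
--     seen = set()
--     pure = []
--     for clause in formula:
--         for x in clause:
--             if x not in seen:
--                 seen.add(x)
--                 if -x in seen:
--                     if -x in pure:
--                         pure.remove(-x)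
--                 else:
--                     pure.append(x)
--     return set(pure)
-- ===== Notes on version B (the rewrite author's own statement) =====
-- stated objective: alternative
-- what changed: Replaces A's two staged passes (build a full occurrence dict, then filter its keys by negation membership) with a single online pass maintaining a seen-set and a pure-candidate list: a first-seen literal is appended as a candidate and evicted the moment its negation appears.
import Mathlib
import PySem

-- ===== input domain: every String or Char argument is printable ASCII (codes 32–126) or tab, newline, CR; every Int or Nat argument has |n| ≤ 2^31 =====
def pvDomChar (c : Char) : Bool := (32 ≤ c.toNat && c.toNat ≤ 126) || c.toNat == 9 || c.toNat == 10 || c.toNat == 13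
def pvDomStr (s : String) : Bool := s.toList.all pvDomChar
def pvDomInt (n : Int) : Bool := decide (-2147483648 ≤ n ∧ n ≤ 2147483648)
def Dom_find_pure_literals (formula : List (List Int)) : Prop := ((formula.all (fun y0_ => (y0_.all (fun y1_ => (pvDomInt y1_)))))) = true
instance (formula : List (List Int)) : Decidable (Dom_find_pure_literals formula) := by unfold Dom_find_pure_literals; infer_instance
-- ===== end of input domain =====

-- B replaces A's two staged passes (build an occurrence dict, then filter its keys)
-- by a single online pass keeping a seen-set and a pure-candidate list, evicting a
-- candidate the moment its negation appears (objective: alternative).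

-- ===== PORT A =====
def find_pure_literals (formula : List (List Int)) : List Int :=
  let counter : PySem.Dict Int Int :=
    formula.foldl
      (fun d clause => clause.foldl (fun d literal => d.insert literal (d.getD literal 0 + 1)) d)
      PySem.Dict.empty
  counter.keys.foldl
    (fun s literal => if counter.contains (-literal) then s else PySem.Set.add s literal)
    PySem.Set.empty

-- ===== PORT B =====
-- body of B's inner loop: one literal x updates (seen, pure)
def pvStepB : PySem.Set Int × List Int → Int → PySem.Set Int × List Int
  | (seen, pure), x =>
    if PySem.Set.contains seen x then (seen, pure)
    else if PySem.Set.contains (PySem.Set.add seen x) (-x) then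
      -- guarded pure.remove(-x)
      (PySem.Set.add seen x, if pure.contains (-x) then pure.erase (-x) else pure)
    else
      (PySem.Set.add seen x, pure ++ [x])

def find_pure_literals_alt (formula : List (List Int)) : List Int :=
  let st :=
    formula.foldl (fun st clause => clause.foldl pvStepB st)
      ((PySem.Set.empty : PySem.Set Int), ([] : List Int))
  PySem.Set.ofList st.2

-- ===== PRECONDITION & SPEC =====
def Spec_find_pure_literals (formula : List (List Int)) (out : List Int) : Prop := out = find_pure_literals_alt formula
instance (formula : List (List Int)) (out : List Int) : Decidable (Spec_find_pure_literals formula out) := by unfold Spec_find_pure_literals; infer_instance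

-- ===== CLAIM (what is proved, stated in full; the proofs are below) =====
def Claim_equal_find_pure_literals : Prop := ∀ (formula : List (List Int)), Dom_find_pure_literals formula → Spec_find_pure_literals formula (find_pure_literals formula)

-- ===== LEMMAS AND PROOFS =====

-- a nested fold over clauses is a fold over the flattened literal list
theorem foldl_nested {σ : Type} (f : σ → Int → σ) (formula : List (List Int)) (s : σ) :
    formula.foldl (fun s clause => clause.foldl f s) s
      = (formula.flatMap (fun c => c)).foldl f s := by
  induction formula generalizing s with
  | nil => rfl
  | cons c rest ih => simp [List.foldl_append, ih]

-- A conditional Set.add fold from a clean accumulator is a filter.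
theorem foldl_add_filter (p : Int → Bool) (l s : List Int)
    (h : (s ++ l.filter p).Nodup) :
    l.foldl (fun s x => if p x then PySem.Set.add s x else s) s = s ++ l.filter p := by
  induction l generalizing s with
  | nil => simp
  | cons x t ih =>
      by_cases hp : p x = true
      · have hx : x ∉ s := by
          intro hmem
          have hd := List.disjoint_of_nodup_append (by simpa [hp, List.filter_cons] using h)
          exact hd hmem (by simp [hp])
        have hadd : PySem.Set.add s x = s ++ [x] := PySem.Set.add_of_not_mem hx
        simp only [List.foldl_cons, hp, if_true, hadd]
        rw [ih (s ++ [x]) (by simpa [hp, List.filter_cons] using h)]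
        simp [hp]
      · rw [List.foldl_cons, if_neg hp, ih s (by simpa [hp] using h)]
        simp [hp]

-- A computes: distinct literals in first-occurrence order whose negation never occurs.
theorem A_eq (formula : List (List Int)) :
    find_pure_literals formula
      = (PySem.Set.ofList (formula.flatMap (fun c => c))).filter
          (fun x => !decide (-x ∈ formula.flatMap (fun c => c))) := by
  unfold find_pure_literals
  simp only []
  set lits := formula.flatMap (fun c => c) with hlits
  set counter : PySem.Dict Int Int :=
    formula.foldl
      (fun d clause => clause.foldl (fun d literal => d.insert literal (d.getD literal 0 + 1)) d)
      PySem.Dict.empty with hcounter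
  have hc : counter = lits.foldl (fun d literal => d.insert literal (d.getD literal 0 + 1))
      PySem.Dict.empty := foldl_nested _ formula _
  have hkeys : counter.keys = PySem.Set.ofList lits := by
    rw [hc, PySem.Dict.keys_foldl_insert]
    simp [PySem.Set.update, PySem.Set.ofList_eq_foldl, PySem.Dict.keys_empty]
  have hcontains : ∀ x : Int, counter.contains x = decide (x ∈ lits) := by
    intro x
    rw [PySem.Dict.contains_eq_decide_mem_keys, hkeys]
    simp [PySem.Set.mem_ofList]
  rw [hkeys]
  have hnodup : (PySem.Set.ofList lits).Nodup := PySem.Set.nodup_ofList lits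
  have hmain := foldl_add_filter (fun x => !counter.contains (-x)) (PySem.Set.ofList lits)
    PySem.Set.empty (by simpa [PySem.Set.empty] using hnodup.filter _)
  rw [show (fun (s : PySem.Set Int) literal =>
        if counter.contains (-literal) = true then s else PySem.Set.add s literal)
      = (fun s x => if (!counter.contains (-x)) = true then PySem.Set.add s x else s) by
    funext s x; by_cases h : counter.contains (-x) = true <;> simp [h]]
  rw [hmain]
  simp only [PySem.Set.empty, List.nil_append]
  exact List.filter_congr (fun y _ => by rw [hcontains])

-- one B step turns the state for prefix P into the state for P ++ [x]
theorem stepB_eq (P : List Int) (x : Int) :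
    pvStepB (PySem.Set.ofList P,
        (PySem.Set.ofList P).filter (fun y => !decide (-y ∈ P))) x
      = (PySem.Set.ofList (P ++ [x]),
        (PySem.Set.ofList (P ++ [x])).filter (fun y => !decide (-y ∈ P ++ [x]))) := by
  have hmemS : ∀ y : Int, y ∈ PySem.Set.ofList P ↔ y ∈ P := fun y => PySem.Set.mem_ofList ..
  have hofl : PySem.Set.ofList (P ++ [x]) = PySem.Set.add (PySem.Set.ofList P) x :=
    PySem.Set.ofList_append_singleton ..
  by_cases hx : x ∈ P
  · -- literal seen before: state unchanged and the target state is unchanged too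
    have hcon : (PySem.Set.ofList P).contains x = true :=
      (PySem.Set.contains_iff ..).mpr ((hmemS x).mpr hx)
    have hadd : PySem.Set.add (PySem.Set.ofList P) x = PySem.Set.ofList P := by
      simp [PySem.Set.add, hx]
    have hfilt : (PySem.Set.ofList P).filter (fun y => !decide (-y ∈ P ++ [x]))
        = (PySem.Set.ofList P).filter (fun y => !decide (-y ∈ P)) := by
      refine List.filter_congr (fun y _ => ?_)
      have hiff : (-y ∈ P ++ [x]) ↔ (-y ∈ P) := by
        simp only [List.mem_append, List.mem_singleton]
        constructor
        · rintro (h | h)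
          · exact h
          · rw [h]; exact hx
        · exact Or.inl
      simp [hiff]
    simp only [pvStepB]
    rw [if_pos hcon, hofl, hadd, Prod.mk.injEq]
    exact ⟨rfl, hfilt.symm⟩
  · -- first occurrence of x
    have hcon : (PySem.Set.ofList P).contains x = false := by
      rw [Bool.eq_false_iff]
      intro hc
      exact hx ((hmemS x).mp ((PySem.Set.contains_iff ..).mp hc))
    have hadd : PySem.Set.add (PySem.Set.ofList P) x = PySem.Set.ofList P ++ [x] :=
      PySem.Set.add_of_not_mem (fun hm => hx ((hmemS x).mp hm))
    have hnd : (PySem.Set.ofList P).Nodup := PySem.Set.nodup_ofList P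
    have hndf : ((PySem.Set.ofList P).filter (fun y => !decide (-y ∈ P))).Nodup :=
      hnd.filter _
    by_cases hneg : (-x ∈ P ∨ -x = x)
    · -- negation already present (or x = 0): x is not pure; evict a candidate -x if any
      have hmemPx : -x ∈ P ++ [x] := by
        rcases hneg with h | h
        · exact List.mem_append.mpr (Or.inl h)
        · exact List.mem_append.mpr (Or.inr (by simp [h]))
      have hcon2 : (PySem.Set.ofList P ++ [x]).contains (-x) = true := by
        refine (PySem.Set.contains_iff ..).mpr ?_
        rcases hneg with h | h
        · exact List.mem_append.mpr (Or.inl ((hmemS _).mpr h))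
        · exact List.mem_append.mpr (Or.inr (by simp [h]))
      have htgt : (PySem.Set.ofList P ++ [x]).filter (fun y => !decide (-y ∈ P ++ [x]))
          = ((PySem.Set.ofList P).filter (fun y => !decide (-y ∈ P))).filter
              (fun y => y != -x) := by
        rw [List.filter_append]
        have h1 : List.filter (fun y => !decide (-y ∈ P ++ [x])) [x] = [] := by
          rw [List.filter_singleton, decide_eq_true hmemPx]
          simp
        have h2 : (PySem.Set.ofList P).filter (fun y => !decide (-y ∈ P ++ [x]))
            = (PySem.Set.ofList P).filter
                (fun y => (y != -x) && !decide (-y ∈ P)) := by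
          refine List.filter_congr (fun y _ => ?_)
          have hiff : (-y ∈ P ++ [x]) ↔ (-y ∈ P ∨ y = -x) := by
            simp only [List.mem_append, List.mem_singleton]
            constructor
            · rintro (h | h)
              · exact Or.inl h
              · exact Or.inr (by omega)
            · rintro (h | h)
              · exact Or.inl h
              · exact Or.inr (by omega)
          by_cases ha : -y ∈ P <;> by_cases hb : y = -x <;> simp [hiff, ha, hb]
        rw [h1, h2, List.append_nil, List.filter_filter]
      have hpure :
          (if ((PySem.Set.ofList P).filter (fun y => !decide (-y ∈ P))).contains (-x)
            then ((PySem.Set.ofList P).filter (fun y => !decide (-y ∈ P))).erase (-x)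
            else (PySem.Set.ofList P).filter (fun y => !decide (-y ∈ P)))
          = (PySem.Set.ofList P ++ [x]).filter (fun y => !decide (-y ∈ P ++ [x])) := by
        by_cases hmemp :
            ((PySem.Set.ofList P).filter (fun y => !decide (-y ∈ P))).contains (-x) = true
        · rw [if_pos hmemp, htgt, List.Nodup.erase_eq_filter hndf]
        · rw [if_neg hmemp, htgt]
          have hnm : -x ∉ (PySem.Set.ofList P).filter (fun y => !decide (-y ∈ P)) :=
            fun hmem => hmemp (by simpa using hmem)
          refine (List.filter_eq_self.mpr (fun y hy => ?_)).symm
          have hne : y ≠ -x := fun h => hnm (h ▸ hy)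
          simp [hne]
      simp only [pvStepB]
      rw [if_neg (by simp only [hcon]; exact Bool.false_ne_true),
          if_pos (by rw [hadd]; exact hcon2), hofl, hadd, Prod.mk.injEq]
      exact ⟨rfl, hpure⟩
    · -- negation absent: x becomes a pure candidate
      have hn1 : -x ∉ P := fun h => hneg (Or.inl h)
      have hn2 : -x ≠ x := fun h => hneg (Or.inr h)
      have hnmem : -x ∉ P ++ [x] := by
        simp only [List.mem_append, List.mem_singleton]
        rintro (h | h)
        · exact hn1 h
        · exact hn2 h
      have hcon2 : (PySem.Set.ofList P ++ [x]).contains (-x) = false := by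
        rw [Bool.eq_false_iff]
        intro hc
        rcases List.mem_append.mp ((PySem.Set.contains_iff ..).mp hc) with h | h
        · exact hn1 ((hmemS _).mp h)
        · exact hn2 (List.mem_singleton.mp h)
      have hpure : (PySem.Set.ofList P ++ [x]).filter (fun y => !decide (-y ∈ P ++ [x]))
          = (PySem.Set.ofList P).filter (fun y => !decide (-y ∈ P)) ++ [x] := by
        rw [List.filter_append]
        have h1 : List.filter (fun y => !decide (-y ∈ P ++ [x])) [x] = [x] := by
          rw [List.filter_singleton, decide_eq_false hnmem]
          simp
        have h2 : (PySem.Set.ofList P).filter (fun y => !decide (-y ∈ P ++ [x]))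
            = (PySem.Set.ofList P).filter (fun y => !decide (-y ∈ P)) := by
          refine List.filter_congr (fun y hy => ?_)
          have hiff : (-y ∈ P ++ [x]) ↔ (-y ∈ P) := by
            simp only [List.mem_append, List.mem_singleton]
            constructor
            · rintro (h | h)
              · exact h
              · exact absurd (show (-x) ∈ P from by
                  rw [show (-x) = y by omega]; exact (hmemS y).mp hy) hn1
            · exact Or.inl
          simp [hiff]
        rw [h1, h2]
      simp only [pvStepB]
      rw [if_neg (by simp only [hcon]; exact Bool.false_ne_true),
          if_neg (by rw [hadd, hcon2]; exact Bool.false_ne_true), hofl, hadd, Prod.mk.injEq]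
      exact ⟨rfl, hpure.symm⟩

-- B's loop invariant over the flattened literal list
theorem B_loop (l P : List Int) :
    l.foldl pvStepB (PySem.Set.ofList P,
        (PySem.Set.ofList P).filter (fun y => !decide (-y ∈ P)))
      = (PySem.Set.ofList (P ++ l),
        (PySem.Set.ofList (P ++ l)).filter (fun y => !decide (-y ∈ P ++ l))) := by
  induction l generalizing P with
  | nil => simp
  | cons x t ih =>
      rw [List.foldl_cons, stepB_eq P x, ih (P ++ [x])]
      simp

-- ===== VERDICT (by name: the statement is the Claim_ definition above) =====
theorem find_pure_literals_spec : Claim_equal_find_pure_literals := by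
  intro formula _
  unfold Spec_find_pure_literals
  rw [A_eq]
  unfold find_pure_literals_alt
  simp only []
  rw [foldl_nested]
  have h0 := B_loop (formula.flatMap (fun c => c)) []
  simp only [List.nil_append] at h0
  rw [show ((PySem.Set.empty : PySem.Set Int), ([] : List Int))
        = (PySem.Set.ofList ([] : List Int),
           (PySem.Set.ofList ([] : List Int)).filter
             (fun y => !decide (-y ∈ ([] : List Int)))) by rfl,
      h0]
  exact Eq.symm (PySem.Set.ofList_eq_self_of_nodup _ ((PySem.Set.nodup_ofList _).filter _))
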